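-- pv_equiv track=rewrite | github.com/jmfelice/data_formatter | src/data_formatter/util.py | unique_string
-- ===== SOURCE A (Python) =====
-- def unique_string(string, string_list):
--     if string not in string_list:
--         return string
--
--     counter = 1
--     while True:
--         new_string = f"{string}_{counter}"
--         if new_string not in string_list:
--             return new_string
--         counter += 1
-- ===== SOURCE B (Python) =====
-- def _suffix_value(prefix, s):
--     """Value n >= 1 if s is exactly prefix + canonical decimal of n, else None."""
--     if not s.startswith(prefix):
--         return None
--     r = s[len(prefix):]
--     if not r.isdigit() or r.startswith("0"):
--         return None
--     n = 0
--     for c in r: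
--         n = 10 * n + (ord(c) - 48)
--     return n
--
--
-- def unique_string(string, string_list):
--     if string not in string_list:
--         return string
--     prefix = string + "_"
--     used = {v for v in (_suffix_value(prefix, s) for s in string_list) if v is not None}
--     expected = 1
--     for v in sorted(used):
--         if v != expected:
--             break
--         expected += 1
--     return prefix + str(expected)
-- ===== Notes on version B (the rewrite author's own statement) =====
-- stated objective: alternative
-- what changed: B inverts the search direction: instead of probing candidate strings string_1, string_2, ... against the list until one is free, it parses each list element once into the counter it occupies (strip 'string_', check canonical decimal, fold digits to an int), sorts those counters, and finds the first gap by a single walk over the sorted list.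
import Mathlib
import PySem

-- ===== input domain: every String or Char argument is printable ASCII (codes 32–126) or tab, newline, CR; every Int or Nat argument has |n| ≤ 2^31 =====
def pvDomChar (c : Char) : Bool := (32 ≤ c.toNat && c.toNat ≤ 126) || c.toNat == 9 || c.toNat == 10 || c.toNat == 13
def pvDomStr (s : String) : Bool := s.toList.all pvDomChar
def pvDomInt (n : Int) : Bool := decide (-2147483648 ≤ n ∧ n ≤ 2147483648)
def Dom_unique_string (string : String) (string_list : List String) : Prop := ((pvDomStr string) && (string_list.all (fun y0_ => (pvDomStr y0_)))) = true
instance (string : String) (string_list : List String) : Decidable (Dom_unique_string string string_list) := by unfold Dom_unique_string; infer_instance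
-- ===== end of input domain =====

-- B inverts the search: it parses each list element into the counter it occupies
-- (strip "string_", canonical-decimal check, digit fold), sorts those counters and
-- walks the sorted list for the first gap, instead of A's probing of candidate
-- strings string_1, string_2, … against the list (objective: alternative).

-- ===== PORT A =====
-- A's 'while True' loop; the fuel (string_list.length + 1) is only a totality guard:
-- among the counters tried, the candidate strings are pairwise distinct, so the loop
-- exits within string_list.length + 1 iterations and the fuel-0 branch is unreachable.
def uloopA (string : String) (string_list : List String) : Nat → Int → String
  | 0, _ => ""
  | fuel+1, counter =>
      let new_string := String.ofList (string.toList ++ '_' :: PySem.Int.toChars counter)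
      if new_string ∈ string_list then uloopA string string_list fuel (counter + 1)
      else new_string

def unique_string (string : String) (string_list : List String) : String :=
  if string ∉ string_list then string
  else uloopA string string_list (string_list.length + 1) 1

-- ===== PORT B =====
-- Source B's _suffix_value: the digit fold 'n = 10*n + (ord(c) - 48)'
def pvDecVal (r : List Char) : Int := r.foldl (fun n c => 10 * n + ((c.toNat : Int) - 48)) 0

def pvSuffixValue? (pref : List Char) (s : String) : Option Int :=
  if PySem.Chars.startswith s.toList pref then
    let r := PySem.List.slice s.toList (some (pref.length : Int)) none
    if !PySem.Chars.strIsdigit r || PySem.Chars.startswith r ['0'] then none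
    else some (pvDecVal r)
  else none

-- Source B's final loop: 'for v in sorted(used): if v != expected: break; expected += 1'
def pvWalk : List Int → Int → Int
  | [], e => e
  | v :: t, e => if v ≠ e then e else pvWalk t (e + 1)

def unique_string_alt (string : String) (string_list : List String) : String :=
  if string ∉ string_list then string
  else
    let pref := string.toList ++ ['_']
    let used : PySem.Set Int := PySem.Set.ofList (string_list.filterMap (pvSuffixValue? pref))
    String.ofList (pref ++ PySem.Int.toChars (pvWalk (PySem.List.sorted used (fun x => x)) 1))

-- ===== PRECONDITION & SPEC =====
def Spec_unique_string (string : String) (string_list : List String) (out : String) : Prop := out = unique_string_alt string string_list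
instance (string : String) (string_list : List String) (out : String) : Decidable (Spec_unique_string string string_list out) := by unfold Spec_unique_string; infer_instance

-- ===== CLAIM (what is proved, stated in full; the proofs are below) =====
def Claim_equal_unique_string : Prop := ∀ (string : String) (string_list : List String), Dom_unique_string string string_list → Spec_unique_string string string_list (unique_string string string_list)

-- ===== LEMMAS AND PROOFS =====

-- the candidate string f"{string}_{k}"
def pvCand (string : String) (k : Int) : String :=
  String.ofList ((string.toList ++ ['_']) ++ PySem.Int.toChars k)

lemma pvCand_cons (string : String) (k : Int) :
    String.ofList (string.toList ++ '_' :: PySem.Int.toChars k) = pvCand string k := by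
  simp [pvCand]

-- the canonical decimal digit string of n (no sign, no leading zero), the
-- mathematical shape of Nat.toDigits 10
def pvSig (n : Nat) : List Char :=
  if h : n < 10 then [Nat.digitChar n]
  else pvSig (n / 10) ++ [Nat.digitChar (n % 10)]
decreasing_by exact Nat.div_lt_self (by omega) (by omega)

lemma pv_toDigitsCore_eq (fuel : Nat) : ∀ (n : Nat) (ds : List Char), n < fuel →
    Nat.toDigitsCore 10 fuel n ds = pvSig n ++ ds := by
  induction fuel with
  | zero => intro n ds h; omega
  | succ f ih =>
    intro n ds h
    rw [Nat.toDigitsCore]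
    by_cases h10 : n / 10 = 0
    · have hlt : n < 10 := by omega
      rw [if_pos h10, pvSig, dif_pos hlt, Nat.mod_eq_of_lt hlt]
      simp
    · have hge : ¬ n < 10 := by omega
      have hdiv : n / 10 < n := Nat.div_lt_self (by omega) (by omega)
      rw [if_neg h10, ih (n / 10) _ (by omega)]
      conv_rhs => rw [pvSig]
      rw [dif_neg hge]
      simp
lemma pv_toChars_eq_pvSig (k : Int) (hk : 1 ≤ k) : PySem.Int.toChars k = pvSig k.toNat := by
  rw [PySem.Int.toChars, if_neg (by omega), Nat.toDigits,
      pv_toDigitsCore_eq (k.toNat + 1) k.toNat [] (by omega), List.append_nil]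

lemma pv_digitChar_toNat (k : Nat) (h : k < 10) : (Nat.digitChar k).toNat = k + 48 := by
  interval_cases k <;> decide

lemma pv_char_eq_of_toNat_eq (c d : Char) (h : c.toNat = d.toNat) : c = d := by
  have h1 := Char.ofNat_toNat c
  rw [h, Char.ofNat_toNat d] at h1
  exact h1.symm

lemma pv_isdigit_bounds (c : Char) (h : PySem.Chars.isdigit c = true) :
    48 ≤ c.toNat ∧ c.toNat ≤ 57 := by
  simp only [PySem.Chars.isdigit, Bool.and_eq_true, decide_eq_true_eq, Char.le_def] at h
  exact ⟨h.1, h.2⟩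

lemma pv_digitChar_of_digit (c : Char) (h : PySem.Chars.isdigit c = true) :
    Nat.digitChar (c.toNat - 48) = c := by
  obtain ⟨h1, h2⟩ := pv_isdigit_bounds c h
  apply pv_char_eq_of_toNat_eq
  rw [pv_digitChar_toNat _ (by omega)]
  omega

lemma pvSig_digits (n : Nat) : ∀ c ∈ pvSig n, PySem.Chars.isdigit c = true := by
  induction n using pvSig.induct with
  | case1 n h =>
    rw [pvSig, dif_pos h]
    intro c hc
    rw [List.mem_singleton] at hc
    subst hc
    interval_cases n <;> decide
  | case2 n h ih =>
    rw [pvSig, dif_neg h]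
    intro c hc
    rcases List.mem_append.mp hc with hc | hc
    · exact ih c hc
    · rw [List.mem_singleton] at hc
      subst hc
      have hlt : n % 10 < 10 := Nat.mod_lt _ (by omega)
      interval_cases h : n % 10 <;> decide

lemma pvSig_ne_nil (n : Nat) : pvSig n ≠ [] := by
  rw [pvSig]
  split <;> simp

lemma pvSig_head_ne_zero (n : Nat) (hn : 1 ≤ n) : ∀ t, pvSig n ≠ '0' :: t := by
  induction n using pvSig.induct with
  | case1 n h =>
    intro t he
    rw [pvSig, dif_pos h] at he
    have h0 : Nat.digitChar n = '0' := (List.cons.injEq _ _ _ _ ▸ he).1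
    have h1 := pv_digitChar_toNat n h
    rw [h0] at h1
    simp at h1
    omega
  | case2 n h ih =>
    intro t he
    rw [pvSig, dif_neg h] at he
    obtain ⟨d, l, hd⟩ := List.exists_cons_of_ne_nil (pvSig_ne_nil (n / 10))
    rw [hd] at he
    simp only [List.cons_append, List.cons.injEq] at he
    exact ih (by omega) l (by rw [hd, he.1])

lemma pvDecVal_append (l : List Char) (c : Char) :
    pvDecVal (l ++ [c]) = 10 * pvDecVal l + ((c.toNat : Int) - 48) := by
  simp [pvDecVal, List.foldl_append]

lemma pvDecVal_sig (n : Nat) : pvDecVal (pvSig n) = (n : Int) := by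
  induction n using pvSig.induct with
  | case1 n h =>
    rw [pvSig, dif_pos h]
    simp [pvDecVal, pv_digitChar_toNat n h]
  | case2 n h ih =>
    rw [pvSig, dif_neg h, pvDecVal_append, ih,
        pv_digitChar_toNat _ (Nat.mod_lt _ (by omega))]
    push_cast
    omega

lemma pv_foldl_ge (t : List Char) : ∀ a : Int, 0 ≤ a →
    (∀ c ∈ t, PySem.Chars.isdigit c = true) →
    a ≤ t.foldl (fun n c => 10 * n + ((c.toNat : Int) - 48)) a := by
  induction t with
  | nil => intro a _ _; simp
  | cons c t ih =>
    intro a ha hd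
    have hc := pv_isdigit_bounds c (hd c (List.mem_cons_self ..))
    calc a ≤ 10 * a + ((c.toNat : Int) - 48) := by omega
      _ ≤ _ := ih _ (by omega) (fun x hx => hd x (List.mem_cons_of_mem _ hx))

lemma pvDecVal_pos (d : Char) (t : List Char)
    (hd : ∀ c ∈ d :: t, PySem.Chars.isdigit c = true) (h0 : d ≠ '0') :
    1 ≤ pvDecVal (d :: t) := by
  have hb := pv_isdigit_bounds d (hd d (List.mem_cons_self ..))
  have hne : d.toNat ≠ 48 := by
    intro he
    exact h0 (pv_char_eq_of_toNat_eq d '0' (by rw [he]; decide))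
  rw [pvDecVal, List.foldl_cons]
  calc (1 : Int) ≤ 10 * 0 + ((d.toNat : Int) - 48) := by omega
    _ ≤ _ := pv_foldl_ge t _ (by omega) (fun x hx => hd x (List.mem_cons_of_mem _ hx))

lemma pv_roundtrip : ∀ r : List Char, r ≠ [] →
    (∀ c ∈ r, PySem.Chars.isdigit c = true) → (∀ t, r ≠ '0' :: t) →
    pvSig (pvDecVal r).toNat = r := by
  intro r
  induction r using List.reverseRecOn with
  | nil => intro h; exact absurd rfl h
  | append_singleton l c ih =>
    intro _ hdig h0
    have hc := pv_isdigit_bounds c (hdig c (by simp))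
    rw [pvDecVal_append]
    by_cases hl : l = []
    · subst hl
      have hv : (10 * pvDecVal [] + ((c.toNat : Int) - 48)).toNat = c.toNat - 48 := by
        simp only [pvDecVal, List.foldl_nil]
        omega
      rw [hv, pvSig, dif_pos (by omega)]
      rw [pv_digitChar_of_digit c (hdig c (by simp))]
      simp
    · obtain ⟨d, l', rfl⟩ := List.exists_cons_of_ne_nil hl
      have hdigl : ∀ x ∈ d :: l', PySem.Chars.isdigit x = true :=
        fun x hx => hdig x (List.mem_append_left _ hx)
      have hd0 : d ≠ '0' := by
        intro he
        exact h0 (l' ++ [c]) (by rw [he]; simp)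
      have hv1 : 1 ≤ pvDecVal (d :: l') := pvDecVal_pos d l' hdigl hd0
      have hm : (10 * pvDecVal (d :: l') + ((c.toNat : Int) - 48)).toNat
          = 10 * (pvDecVal (d :: l')).toNat + (c.toNat - 48) := by omega
      rw [hm, pvSig, dif_neg (by omega)]
      have hdiv : (10 * (pvDecVal (d :: l')).toNat + (c.toNat - 48)) / 10
          = (pvDecVal (d :: l')).toNat := by omega
      have hmod : (10 * (pvDecVal (d :: l')).toNat + (c.toNat - 48)) % 10
          = c.toNat - 48 := by omega
      rw [hdiv, hmod, pv_digitChar_of_digit c (hdig c (by simp)),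
          ih hl hdigl (fun t ht => h0 (t ++ [c]) (by rw [ht]; simp))]

lemma pv_toChars_inj (j k : Int) (hj : 1 ≤ j) (hk : 1 ≤ k)
    (h : PySem.Int.toChars j = PySem.Int.toChars k) : j = k := by
  rw [pv_toChars_eq_pvSig _ hj, pv_toChars_eq_pvSig _ hk] at h
  have h2 := congrArg pvDecVal h
  rw [pvDecVal_sig, pvDecVal_sig] at h2
  omega

-- a list element parses to k exactly when it is the candidate string for k ≥ 1
lemma pv_parse_iff (pref : List Char) (s : String) (k : Int) :
    pvSuffixValue? pref s = some k ↔
      (1 ≤ k ∧ s = String.ofList (pref ++ PySem.Int.toChars k)) := by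
  constructor
  · intro h
    simp only [pvSuffixValue?] at h
    by_cases h1 : PySem.Chars.startswith s.toList pref = true
    · rw [if_pos h1] at h
      obtain ⟨u, hu⟩ := (PySem.Chars.startswith_iff _ _).mp h1
      have hr : PySem.List.slice s.toList (some (pref.length : Int)) none = u := by
        rw [PySem.List.slice_from_natCast, ← hu, List.drop_left]
      rw [hr] at h
      by_cases h2 : (!PySem.Chars.strIsdigit u || PySem.Chars.startswith u ['0']) = true
      · rw [if_pos h2] at h; exact absurd h (by simp)
      · rw [if_neg h2] at h
        have h2' : PySem.Chars.strIsdigit u = true ∧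
            PySem.Chars.startswith u ['0'] = false := by
          rcases Bool.eq_false_or_eq_true (PySem.Chars.strIsdigit u) with hb | hb <;>
            rcases Bool.eq_false_or_eq_true (PySem.Chars.startswith u ['0']) with hb2 | hb2 <;>
            simp [hb, hb2] at h2 ⊢
        have hne : u ≠ [] := by
          intro he
          rw [he] at h2'
          exact absurd h2'.1 (by decide)
        have hdig : ∀ c ∈ u, PySem.Chars.isdigit c = true := by
          have := h2'.1
          simp only [PySem.Chars.strIsdigit, Bool.and_eq_true, List.all_eq_true] at this
          exact fun c hc => this.2 c hc
        have h00 : ∀ t, u ≠ '0' :: t := by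
          intro t ht
          have : PySem.Chars.startswith u ['0'] = true := by
            rw [PySem.Chars.startswith_iff, ht]
            exact ⟨t, rfl⟩
          rw [this] at h2'
          exact absurd h2'.2 (by simp)
        have hk2 : pvDecVal u = k := by
          have := h
          simp only [Option.some.injEq] at this
          exact this
        obtain ⟨d, t', rfl⟩ := List.exists_cons_of_ne_nil hne
        have hpos : 1 ≤ k := hk2 ▸ pvDecVal_pos d t' hdig (fun he => h00 t' (by rw [he]))
        refine ⟨hpos, ?_⟩
        have hrt : PySem.Int.toChars k = d :: t' := by
          rw [pv_toChars_eq_pvSig _ hpos, ← hk2]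
          exact pv_roundtrip (d :: t') hne hdig h00
        have hs : s = String.ofList (pref ++ (d :: t')) := by
          rw [hu, String.ofList_toList]
        rw [hrt]
        exact hs
    · rw [if_neg h1] at h
      exact absurd h (by simp)
  · rintro ⟨hk, rfl⟩
    have htl : (String.ofList (pref ++ PySem.Int.toChars k)).toList
        = pref ++ pvSig k.toNat := by
      rw [String.toList_ofList, pv_toChars_eq_pvSig _ hk]
    simp only [pvSuffixValue?, htl]
    rw [if_pos ((PySem.Chars.startswith_iff _ _).mpr (List.prefix_append _ _))]
    have hr : PySem.List.slice (pref ++ pvSig k.toNat) (some (pref.length : Int)) none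
        = pvSig k.toNat := by
      rw [PySem.List.slice_from_natCast, List.drop_left]
    rw [hr]
    have hdig : PySem.Chars.strIsdigit (pvSig k.toNat) = true := by
      simp only [PySem.Chars.strIsdigit, Bool.and_eq_true, List.all_eq_true]
      exact ⟨by simp [pvSig_ne_nil], fun c hc => pvSig_digits _ c hc⟩
    have h0 : PySem.Chars.startswith (pvSig k.toNat) ['0'] = false := by
      rcases Bool.eq_false_or_eq_true (PySem.Chars.startswith (pvSig k.toNat) ['0']) with hb | hb
      · obtain ⟨u, hu⟩ := (PySem.Chars.startswith_iff _ _).mp hb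
        exact absurd hu.symm (pvSig_head_ne_zero k.toNat (by omega) u)
      · exact hb
    rw [if_neg (by simp [hdig, h0])]
    rw [← pv_toChars_eq_pvSig _ hk]
    congr 1
    rw [pv_toChars_eq_pvSig _ hk, pvDecVal_sig]
    omega

-- A's loop returns the first free candidate
lemma pv_uloopA_eq (string : String) (string_list : List String) :
    ∀ (fuel : Nat) (c m : Int),
      pvCand string m ∉ string_list → c ≤ m →
      (∀ x, c ≤ x → x < m → pvCand string x ∈ string_list) →
      m < c + fuel →
      uloopA string string_list fuel c = pvCand string m := by
  intro fuel
  induction fuel with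
  | zero => intro c m _ h2 _ h4; omega
  | succ f ih =>
    intro c m hm hcm hall hfuel
    simp only [uloopA, pvCand_cons]
    by_cases hc : pvCand string c ∈ string_list
    · rw [if_pos hc]
      have hne : c ≠ m := fun he => hm (he ▸ hc)
      exact ih (c+1) m hm (by omega) (fun x h1 h2 => hall x (by omega) h2) (by omega)
    · rw [if_neg hc]
      have he : m = c := by
        by_contra hne
        exact hc (hall c le_rfl (by omega))
      rw [he]

-- pigeonhole: within the first length+1 counters some candidate is free
lemma pv_exists_missing (string : String) (string_list : List String) :
    ∃ j : Nat, j ≤ string_list.length ∧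
      pvCand string (1 + (j : Int)) ∉ string_list := by
  by_contra h
  simp only [not_exists, not_and, not_not] at h
  have hmaps : Set.MapsTo (fun j : Nat => pvCand string (1 + (j : Int)))
      ↑(Finset.range (string_list.length + 1)) ↑string_list.toFinset := by
    intro j hj
    simp only [Finset.coe_range, Set.mem_Iio] at hj
    simp only [List.coe_toFinset, Set.mem_setOf_eq]
    exact h j (by omega)
  have hinj : Set.InjOn (fun j : Nat => pvCand string (1 + (j : Int)))
      ↑(Finset.range (string_list.length + 1)) := by
    intro j1 _ j2 _ he
    simp only [pvCand] at he
    have he2 := congrArg String.toList he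
    simp only [String.toList_ofList] at he2
    have he3 := List.append_cancel_left he2
    have := pv_toChars_inj _ _ (by omega) (by omega) he3
    omega
  have hcard := Finset.card_le_card_of_injOn _ hmaps hinj
  rw [Finset.card_range] at hcard
  have := List.toFinset_card_le string_list
  omega

-- B's walk over the sorted used counters returns the least free counter
lemma pv_pvWalk_eq : ∀ (l : List Int) (e m : Int),
    l.Pairwise (· < ·) → (∀ v ∈ l, e ≤ v) → m ∉ l → e ≤ m →
    (∀ x, e ≤ x → x < m → x ∈ l) → pvWalk l e = m := by
  intro l
  induction l with
  | nil =>
    intro e m _ _ _ hem hlt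
    rw [pvWalk]
    by_contra hne
    have hx := hlt e le_rfl (by omega)
    simp at hx
  | cons v t ih =>
    intro e m hp hge hm hem hlt
    rw [pvWalk]
    by_cases hv : v = e
    · rw [if_neg (by simp [hv])]
      have hmnv : m ≠ v := fun he => hm (he ▸ List.mem_cons_self ..)
      apply ih (e+1) m hp.of_cons
      · intro x hx
        have := List.rel_of_pairwise_cons hp hx
        omega
      · exact fun hx => hm (List.mem_cons_of_mem _ hx)
      · omega
      · intro x h1 h2
        rcases List.mem_cons.mp (hlt x (by omega) h2) with he | ht
        · omega
        · exact ht
    · rw [if_pos hv]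
      by_contra hne
      rcases List.mem_cons.mp (hlt e le_rfl (by omega)) with he | ht
      · exact hv he.symm
      · have h1 := List.rel_of_pairwise_cons hp ht
        have h2 := hge v (List.mem_cons_self ..)
        omega

-- ===== VERDICT (by name: the statement is the Claim_ definition above) =====
theorem unique_string_spec : Claim_equal_unique_string := by
  intro string string_list _
  unfold Spec_unique_string unique_string unique_string_alt
  by_cases hmem : string ∈ string_list
  · rw [if_neg (not_not_intro hmem), if_neg (not_not_intro hmem)]
    obtain ⟨j0, hj0, hfree⟩ := pv_exists_missing string string_list
    have hex : ∃ j : Nat, pvCand string (1 + (j : Int)) ∉ string_list := ⟨j0, hfree⟩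
    have hmfree : pvCand string (1 + ((Nat.find hex : Nat) : Int)) ∉ string_list :=
      Nat.find_spec hex
    have hallm : ∀ x : Int, 1 ≤ x → x < 1 + ((Nat.find hex : Nat) : Int) →
        pvCand string x ∈ string_list := by
      intro x h1 h2
      have hlt : (x - 1).toNat < Nat.find hex := by omega
      have hx : (1 + (((x - 1).toNat : Nat) : Int)) = x := by omega
      have := Nat.find_min hex hlt
      rw [← hx]
      exact not_not.mp this
    have hbound : Nat.find hex ≤ j0 := Nat.find_min' hex hfree
    have hA := pv_uloopA_eq string string_list (string_list.length + 1) 1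
      (1 + ((Nat.find hex : Nat) : Int)) hmfree (by omega) hallm
      (by push_cast; omega)
    rw [hA]
    have hmemiff : ∀ k : Int,
        k ∈ PySem.List.sorted
          (PySem.Set.ofList (string_list.filterMap (pvSuffixValue? (string.toList ++ ['_']))))
          (fun x => x) ↔ (1 ≤ k ∧ pvCand string k ∈ string_list) := by
      intro k
      rw [PySem.List.mem_sorted, PySem.Set.mem_ofList, List.mem_filterMap]
      constructor
      · rintro ⟨s, hs, hp⟩
        obtain ⟨hk, rfl⟩ := (pv_parse_iff _ s k).mp hp
        exact ⟨hk, hs⟩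
      · rintro ⟨hk, hs⟩
        exact ⟨pvCand string k, hs, (pv_parse_iff _ _ k).mpr ⟨hk, rfl⟩⟩
    have hw := pv_pvWalk_eq
      (PySem.List.sorted
        (PySem.Set.ofList (string_list.filterMap (pvSuffixValue? (string.toList ++ ['_']))))
        (fun x => x))
      1 (1 + ((Nat.find hex : Nat) : Int))
      (PySem.List.sorted_ofList_pairwise_lt _)
      (fun v hv => ((hmemiff v).mp hv).1)
      (fun hc => hmfree ((hmemiff _).mp hc).2)
      (by omega)
      (fun x h1 h2 => (hmemiff x).mpr ⟨h1, hallm x h1 h2⟩)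
    show pvCand string (1 + ((Nat.find hex : Nat) : Int)) =
      String.ofList ((string.toList ++ ['_']) ++ PySem.Int.toChars (pvWalk
        (PySem.List.sorted
          (PySem.Set.ofList (string_list.filterMap (pvSuffixValue? (string.toList ++ ['_']))))
          (fun x => x)) 1))
    rw [hw]
    rfl
  · rw [if_pos hmem, if_pos hmem]
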